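-- pv_equiv track=rewrite | github.com/niufir/lingtrain-aligner-cmd | src/AlignerImproved/Extarct_EPUB.py | CombineSplittedLines
-- ===== SOURCE A (Python) =====
-- import typing
--
-- def CombineSplittedLines(txt:typing.List[str]):
--     res = []
--     for ix, l in enumerate(txt):
--         if (len(l.strip())==0):continue;
--         if len(res)==0:
--             res.append(l.rstrip())
--             continue
--         l_prev = res[-1]
--         if l_prev[-1] == '-':
--             res[-1] = res[-1].rstrip()[:-1] + l.strip()
--         else:
--             res.append(l.rstrip())
--     return res
-- ===== SOURCE B (Python) =====
-- import typing
--
-- def CombineSplittedLines(txt: typing.List[str]):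
--     # Backward pass: each nonblank line is classified by its own stripped text
--     # ending in '-'; groups are assembled right-to-left, the leading whitespace
--     # of the (provisional) first line kept separately, and output is built
--     # back-to-front then reversed.
--     res = []
--     pend = None  # (leading_ws_of_first_line, strip-merged body)
--     for l in reversed(txt):
--         core = l.strip()
--         if not core:
--             continue
--         ws = l[:len(l) - len(l.lstrip())]
--         if core.endswith('-'):
--             body = core if pend is None else core[:-1] + pend[1]
--             pend = (ws, body)
--         else:
--             if pend is not None:
--                 res.append(pend[0] + pend[1])
--             pend = (ws, core)
--     if pend is not None:
--         res.append(pend[0] + pend[1])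
--     res.reverse()
--     return res
-- ===== Notes on version B (the rewrite author's own statement) =====
-- stated objective: alternative
-- what changed: B scans the lines in REVERSE, classifies each line by its own stripped text ending in '-' (instead of A's test on the accumulated res[-1]), keeps the provisional first line's leading whitespace separate from the strip-merged body, and builds the output back-to-front with a final reverse.
import Mathlib
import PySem

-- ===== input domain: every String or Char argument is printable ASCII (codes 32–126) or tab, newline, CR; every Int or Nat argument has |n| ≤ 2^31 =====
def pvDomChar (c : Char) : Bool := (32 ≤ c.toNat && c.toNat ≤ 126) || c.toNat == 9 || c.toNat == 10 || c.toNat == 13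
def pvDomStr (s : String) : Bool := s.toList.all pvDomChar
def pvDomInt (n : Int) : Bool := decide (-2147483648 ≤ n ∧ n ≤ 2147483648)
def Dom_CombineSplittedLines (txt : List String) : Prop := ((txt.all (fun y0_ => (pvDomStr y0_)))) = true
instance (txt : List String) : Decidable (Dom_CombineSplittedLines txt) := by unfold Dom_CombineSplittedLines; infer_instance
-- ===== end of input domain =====

-- B scans the lines in reverse, classifies each line by its own stripped text ending in '-',
-- and builds the output back-to-front (objective: alternative algorithm; same cost).

-- ===== PORT A =====
-- literal port of A: foldl over enumerate(txt); res[-1] read via pyGet?, written via dropLast ++ [·]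
def CombineSplittedLines (txt : List String) : List String :=
  (PySem.List.enumerate txt 0).foldl (fun res ixl =>
    let l := ixl.2
    if PySem.Str.len (PySem.Str.strip l) = 0 then res
    else if res.length = 0 then res ++ [PySem.Str.rstrip l]
    else
      match PySem.List.pyGet? res (-1) with
      | none => res  -- unreachable: res is nonempty here
      | some l_prev =>
        if PySem.Str.pyGet? l_prev (-1) == some '-' then
          res.dropLast ++
            [PySem.Str.slice (PySem.Str.rstrip l_prev) none (some (-1)) ++ PySem.Str.strip l]
        else res ++ [PySem.Str.rstrip l]) []

-- ===== PORT B =====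
-- one step of B's backward loop: state = (flushed groups, back-to-front; pending (leading ws, strip-merged body))
def pvStepB (st : List String × Option (String × String)) (l : String) : List String × Option (String × String) :=
  let core := PySem.Str.strip l
  if core == "" then st
  else
    let ws := PySem.Str.slice l none
      (some ((PySem.Str.len l : Int) - (PySem.Str.len (PySem.Str.lstrip l) : Int)))
    if PySem.Str.endswith core "-" then
      match st.2 with
      | none => (st.1, some (ws, core))
      | some p => (st.1, some (ws, PySem.Str.slice core none (some (-1)) ++ p.2))
    else
      match st.2 with
      | none => (st.1, some (ws, core))
      | some p => (st.1 ++ [p.1 ++ p.2], some (ws, core))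

def CombineSplittedLines_alt (txt : List String) : List String :=
  let st := txt.reverse.foldl pvStepB ([], none)
  (match st.2 with
   | none => st.1
   | some p => st.1 ++ [p.1 ++ p.2]).reverse

-- ===== PRECONDITION & SPEC =====
def Spec_CombineSplittedLines (txt : List String) (out : List String) : Prop := out = CombineSplittedLines_alt txt
instance (txt : List String) (out : List String) : Decidable (Spec_CombineSplittedLines txt out) := by unfold Spec_CombineSplittedLines; infer_instance

-- ===== CLAIM (what is proved, stated in full; the proofs are below) =====
def Claim_equal_CombineSplittedLines : Prop := ∀ (txt : List String), Dom_CombineSplittedLines txt → Spec_CombineSplittedLines txt (CombineSplittedLines txt)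

-- ===== LEMMAS AND PROOFS =====

-- forward restatement of the merging loop (proof-only bridge between the two ports)
def pvGoB (lines : List String) (res : List String) (cur : Option String) : List String :=
  match lines with
  | [] =>
    match cur with
    | none => res
    | some c => res ++ [c]
  | l :: ls =>
    if PySem.Str.strip l == "" then pvGoB ls res cur
    else
      match cur with
      | none => pvGoB ls res (some (PySem.Str.rstrip l))
      | some c =>
        if PySem.Str.endswith c "-" then
          pvGoB ls res (some (PySem.Str.slice c none (some (-1)) ++ PySem.Str.strip l))
        else pvGoB ls (res ++ [c]) (some (PySem.Str.rstrip l))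

-- B's backward fold, as a foldr from the front (for induction)
def pvGstate (ls : List String) : List String × Option (String × String) :=
  List.foldr (fun l st => pvStepB st l) ([], none) ls

def pvToOut (st : List String × Option (String × String)) : List String :=
  (match st.2 with
   | none => st.1
   | some p => st.1 ++ [p.1 ++ p.2]).reverse

-- what pvGoB produces from pending group c followed by the lines summarised by st
def pvConsume (c : String) (st : List String × Option (String × String)) : List String :=
  if PySem.Str.endswith c "-" then
    match st.2 with
    | none => c :: st.1.reverse
    | some p => (PySem.Str.slice c none (some (-1)) ++ p.2) :: st.1.reverse
  else c :: pvToOut st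

theorem pv_strip_empty {l : String} (hb : PySem.Chars.strip l.toList = []) :
    PySem.Str.strip l = "" :=
  String.toList_inj.mp (by simp [hb])

-- a "group in progress" string: already right-stripped and nonempty
def pvGood (c : String) : Prop := PySem.Str.rstrip c = c ∧ c ≠ ""

theorem pv_rstrip_idem (l : String) :
    PySem.Str.rstrip (PySem.Str.rstrip l) = PySem.Str.rstrip l := by
  apply String.toList_inj.mp
  simp [PySem.Chars.rstrip, List.dropWhile_idempotent]

theorem pv_rstrip_ne_nil (l : String) (h : PySem.Str.strip l ≠ "") :
    PySem.Str.rstrip l ≠ "" := by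
  intro hc
  apply h
  apply String.toList_inj.mp
  have hc' := congrArg String.toList hc
  simp [PySem.Chars.rstrip, PySem.Chars.strip, PySem.Chars.lstrip,
    List.dropWhile_eq_nil_iff] at *
  intro x hx
  exact hc' x ((List.dropWhile_sublist _).subset hx)

theorem pv_strip_rstripped (l : String) :
    PySem.Str.rstrip (PySem.Str.strip l) = PySem.Str.strip l := by
  apply String.toList_inj.mp
  simp [PySem.Chars.rstrip, PySem.Chars.strip, PySem.Chars.lstrip, List.dropWhile_idempotent]

theorem pv_rstrip_append (x s : String) (hs : PySem.Str.rstrip s = s) (hne : s ≠ "") :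
    PySem.Str.rstrip (x ++ s) = x ++ s := by
  apply String.toList_inj.mp
  have hs' : (List.dropWhile PySem.Chars.isspace s.toList.reverse).reverse = s.toList := by
    have := congrArg String.toList hs
    simpa [PySem.Chars.rstrip] using this
  have hne' : s.toList ≠ [] := by
    intro h0; exact hne (String.toList_inj.mp (by simp [h0]))
  have hdrop : List.dropWhile PySem.Chars.isspace s.toList.reverse = s.toList.reverse := by
    have := congrArg List.reverse hs'
    simpa using this
  have hdropne : ¬ (List.dropWhile PySem.Chars.isspace s.toList.reverse).isEmpty := by
    rw [hdrop]
    simpa [List.isEmpty_iff] using hne'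
  simp [PySem.Chars.rstrip, List.dropWhile_append, hdrop]
  intro h0
  exact absurd h0 hne

theorem pv_endswith_eq (c : String) :
    (PySem.Str.pyGet? c (-1) == some '-') = PySem.Str.endswith c "-" := by
  rcases h : c.toList.getLast? with _ | x
  · rw [List.getLast?_eq_none_iff] at h
    simp only [PySem.Str.pyGet?, PySem.Str.endswith_eq, PySem.Chars.pyGet?_eq_listPyGet?,
      PySem.Chars.endswith, h]
    simp [List.isSuffixOf]
    decide
  · rcases List.getLast?_eq_some_iff.mp h with ⟨ys, hys⟩
    simp only [PySem.Str.pyGet?, PySem.Str.endswith_eq, PySem.Chars.pyGet?_eq_listPyGet?,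
      PySem.Chars.endswith, hys]
    have hget : PySem.List.pyGet? (ys ++ [x]) (-1) = some x := by
      simp [PySem.List.pyGet?, PySem.List.pyIdx?]
    rw [hget]
    have hs : ("-" : String).toList = ['-'] := rfl
    rw [hs]
    by_cases hx : x = '-'
    · simp [hx, List.isSuffixOf, List.isPrefixOf]
    · simp [hx, List.isSuffixOf, List.isPrefixOf, Ne.symm hx]

-- A's fold state is the flushed list ++ the pending group (forward correspondence A ↔ pvGoB)
theorem pv_go_eq (ls : List String) (s : Int) (res : List String) (c : String) (hg : pvGood c) :
    (PySem.List.enumerate ls s).foldl (fun res ixl =>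
      let l := ixl.2
      if PySem.Str.len (PySem.Str.strip l) = 0 then res
      else if res.length = 0 then res ++ [PySem.Str.rstrip l]
      else
        match PySem.List.pyGet? res (-1) with
        | none => res
        | some l_prev =>
          if PySem.Str.pyGet? l_prev (-1) == some '-' then
            res.dropLast ++
              [PySem.Str.slice (PySem.Str.rstrip l_prev) none (some (-1)) ++ PySem.Str.strip l]
          else res ++ [PySem.Str.rstrip l]) (res ++ [c])
    = pvGoB ls res (some c) := by
  induction ls generalizing s res c with
  | nil => simp [pvGoB]
  | cons l ls ih =>
    rw [PySem.List.enumerate_cons]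
    by_cases hb : PySem.Chars.strip l.toList = []
    · have h1 : PySem.Str.len (PySem.Str.strip l) = 0 := by simp [hb]
      have h2 : (PySem.Str.strip l == "") = true := by
        simp [pv_strip_empty hb]
      simp only [List.foldl_cons, pvGoB, h1, h2, if_true]
      exact ih (s + 1) res c hg
    · have h1 : ¬ PySem.Str.len (PySem.Str.strip l) = 0 := by simpa using hb
      have h2 : ¬ (PySem.Str.strip l == "") = true := by
        simp only [beq_iff_eq]
        intro h0; exact hb (by simpa using congrArg String.toList h0)
      have hlast : PySem.List.pyGet? (res ++ [c]) (-1) = some c := by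
        simp [pysem, PySem.List.pyGet?, PySem.List.pyIdx?]
      simp only [List.foldl_cons, pvGoB, h1, if_false, h2, hlast,
        List.length_append, List.length_cons]
      rw [if_neg (by simp)]
      rw [pv_endswith_eq c]
      by_cases hdash : PySem.Str.endswith c "-" = true
      · simp only [hdash, if_true, hg.1, List.dropLast_concat]
        apply ih
        constructor
        · apply pv_rstrip_append
          · exact pv_strip_rstripped l
          · intro h0; exact hb (by simpa using congrArg String.toList h0)
        · intro h0
          have := congrArg String.toList h0
          simp at this
          exact hb (by simpa using this.2)
      · simp only [hdash]
        rw [show res ++ [c] ++ [PySem.Str.rstrip l] = (res ++ [c]) ++ [PySem.Str.rstrip l] from rfl]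
        apply ih
        exact ⟨pv_rstrip_idem l, pv_rstrip_ne_nil l (fun h0 =>
          hb (by simpa using congrArg String.toList h0))⟩

theorem pv_start_eq (ls : List String) (s : Int) :
    (PySem.List.enumerate ls s).foldl (fun res ixl =>
      let l := ixl.2
      if PySem.Str.len (PySem.Str.strip l) = 0 then res
      else if res.length = 0 then res ++ [PySem.Str.rstrip l]
      else
        match PySem.List.pyGet? res (-1) with
        | none => res
        | some l_prev =>
          if PySem.Str.pyGet? l_prev (-1) == some '-' then
            res.dropLast ++
              [PySem.Str.slice (PySem.Str.rstrip l_prev) none (some (-1)) ++ PySem.Str.strip l]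
          else res ++ [PySem.Str.rstrip l]) []
    = pvGoB ls [] none := by
  induction ls generalizing s with
  | nil => simp [pvGoB]
  | cons l ls ih =>
    rw [PySem.List.enumerate_cons]
    by_cases hb : PySem.Chars.strip l.toList = []
    · have h1 : PySem.Str.len (PySem.Str.strip l) = 0 := by simp [hb]
      have h2 : (PySem.Str.strip l == "") = true := by
        simp [pv_strip_empty hb]
      simp only [List.foldl_cons, pvGoB, h1, h2, if_true]
      exact ih (s + 1)
    · have h1 : ¬ PySem.Str.len (PySem.Str.strip l) = 0 := by simpa using hb
      have h2 : ¬ (PySem.Str.strip l == "") = true := by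
        simp only [beq_iff_eq]
        intro h0; exact hb (by simpa using congrArg String.toList h0)
      simp only [List.foldl_cons, pvGoB, h1, if_false, h2, List.length_nil,
        List.nil_append]
      rw [show [PySem.Str.rstrip l] = [] ++ [PySem.Str.rstrip l] from rfl]
      apply pv_go_eq
      exact ⟨pv_rstrip_idem l, pv_rstrip_ne_nil l (fun h0 =>
        hb (by simpa using congrArg String.toList h0))⟩

-- endswith "-" only looks at the last character
theorem pv_endswith_last (s : String) :
    PySem.Str.endswith s "-" = (s.toList.getLast? == some '-') := by
  rcases h : s.toList.getLast? with _ | x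
  · rw [List.getLast?_eq_none_iff] at h
    simp only [PySem.Str.endswith_eq, PySem.Chars.endswith, h]
    simp [List.isSuffixOf]
  · rcases List.getLast?_eq_some_iff.mp h with ⟨ys, hys⟩
    simp only [PySem.Str.endswith_eq, PySem.Chars.endswith, hys]
    have hs : ("-" : String).toList = ['-'] := rfl
    rw [hs]
    by_cases hx : x = '-'
    · simp [hx, List.isSuffixOf, List.isPrefixOf]
    · simp [hx, List.isSuffixOf, List.isPrefixOf, Ne.symm hx]

theorem pv_toList_ne (y : String) (hy : y ≠ "") : y.toList ≠ [] := by
  intro h0; exact hy (String.toList_inj.mp (by simp [h0]))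

theorem pv_endswith_append (x y : String) (hy : y ≠ "") :
    PySem.Str.endswith (x ++ y) "-" = PySem.Str.endswith y "-" := by
  rw [pv_endswith_last, pv_endswith_last]
  simp [List.getLast?_append_of_ne_nil _ (pv_toList_ne y hy)]

theorem pv_slice_append (x y : String) (hy : y ≠ "") :
    PySem.Str.slice (x ++ y) none (some (-1)) = x ++ PySem.Str.slice y none (some (-1)) := by
  apply String.toList_inj.mp
  simp only [PySem.Str.toList_slice, String.toList_append, PySem.Chars.slice_eq_listSlice,
    PySem.List.slice_to_neg_one]
  exact List.dropLast_append_of_ne_nil (pv_toList_ne y hy)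

theorem pv_rstrip_decomp (l : String) (h : PySem.Str.strip l ≠ "") :
    PySem.Str.rstrip l =
      PySem.Str.slice l none
        (some ((PySem.Str.len l : Int) - (PySem.Str.len (PySem.Str.lstrip l) : Int)))
      ++ PySem.Str.strip l := by
  apply String.toList_inj.mp
  have hdw : l.toList.dropWhile PySem.Chars.isspace ≠ [] := by
    intro h0
    apply h
    apply String.toList_inj.mp
    simp [PySem.Chars.strip, PySem.Chars.lstrip, PySem.Chars.rstrip, h0]
  -- the slice is the leading-whitespace prefix
  have hlen : ((PySem.Str.len l : Int) - (PySem.Str.len (PySem.Str.lstrip l) : Int))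
      = ((l.toList.takeWhile PySem.Chars.isspace).length : Int) := by
    have := List.takeWhile_append_dropWhile (p := PySem.Chars.isspace) (l := l.toList)
    have hl : l.toList.length
        = (l.toList.takeWhile PySem.Chars.isspace).length
          + (l.toList.dropWhile PySem.Chars.isspace).length := by
      conv_lhs => rw [← this]
      exact List.length_append
    simp only [PySem.Str.len_eq]
    rw [PySem.Str.toList_lstrip]
    simp only [PySem.Chars.lstrip]
    omega
  have hslice : (PySem.Str.slice l none
      (some ((PySem.Str.len l : Int) - (PySem.Str.len (PySem.Str.lstrip l) : Int)))).toList
      = l.toList.takeWhile PySem.Chars.isspace := by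
    rw [hlen]
    simp only [PySem.Str.toList_slice, PySem.Chars.slice_eq_listSlice]
    rw [PySem.List.slice_to_natCast]
    exact (List.prefix_iff_eq_take.mp (List.takeWhile_prefix _)).symm
  simp only [String.toList_append, hslice, PySem.Str.toList_rstrip, PySem.Str.toList_strip,
    PySem.Chars.rstrip, PySem.Chars.strip, PySem.Chars.lstrip]
  -- now pure list reasoning on cs = tw ++ dw
  conv_lhs => rw [← List.takeWhile_append_dropWhile (p := PySem.Chars.isspace) (l := l.toList)]
  set tw := l.toList.takeWhile PySem.Chars.isspace with htw
  set dw := l.toList.dropWhile PySem.Chars.isspace with hdwdef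
  have hdwrev : dw.reverse.dropWhile PySem.Chars.isspace ≠ [] := by
    intro h0
    rw [List.dropWhile_eq_nil_iff] at h0
    have hall := h0
    rcases List.exists_cons_of_ne_nil hdw with ⟨a, t, hat⟩
    have ha : ¬ PySem.Chars.isspace a := by
      have := List.head?_dropWhile_not (p := PySem.Chars.isspace) (l := l.toList)
      rw [← hdwdef, hat] at this
      simpa using this
    exact ha (by simpa using hall a (by simp [hat]))
  rw [List.reverse_append, List.dropWhile_append]
  simp only [List.isEmpty_iff, hdwrev, if_false]
  simp

-- consuming a completed group = flushing it through one backward step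
theorem pv_consume_rstrip (l : String) (st : List String × Option (String × String))
    (h : ¬ (PySem.Str.strip l == "") = true) :
    pvConsume (PySem.Str.rstrip l) st = pvToOut (pvStepB st l) := by
  have hne : PySem.Str.strip l ≠ "" := by simpa using h
  rw [pv_rstrip_decomp l hne]
  simp only [pvStepB]
  rw [if_neg h]
  simp only [pvConsume, pv_endswith_append _ _ hne]
  rcases hst : st.2 with _ | p <;>
    by_cases hd : PySem.Str.endswith (PySem.Str.strip l) "-" = true <;>
      simp only [hd, if_true, if_false, Bool.false_eq_true, hst, pvToOut,
        pv_slice_append _ _ hne, List.reverse_append, List.reverse_cons, List.reverse_nil,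
        List.nil_append, List.cons_append, String.append_assoc]

-- consuming a still-open (hyphen-ending) group absorbs the next backward step's pending body
theorem pv_consume_dash (l : String) (st : List String × Option (String × String)) (c : String)
    (h : ¬ (PySem.Str.strip l == "") = true) (hd : PySem.Str.endswith c "-" = true) :
    pvConsume (PySem.Str.slice c none (some (-1)) ++ PySem.Str.strip l) st
      = pvConsume c (pvStepB st l) := by
  have hne : PySem.Str.strip l ≠ "" := by simpa using h
  simp only [pvStepB]
  rw [if_neg h]
  simp only [pvConsume, pv_endswith_append _ _ hne]
  rcases hst : st.2 with _ | p <;>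
    by_cases hd2 : PySem.Str.endswith (PySem.Str.strip l) "-" = true <;>
      simp only [hd, hd2, if_true, if_false, Bool.false_eq_true, hst, pvToOut,
        pv_slice_append _ _ hne, List.reverse_append, List.reverse_cons, List.reverse_nil,
        List.nil_append, List.cons_append, String.append_assoc]

theorem pv_goB_some (ls : List String) (res : List String) (c : String) :
    pvGoB ls res (some c) = res ++ pvConsume c (pvGstate ls) := by
  induction ls generalizing res c with
  | nil =>
    simp only [pvGoB, pvGstate, List.foldr_nil, pvConsume, pvToOut]
    by_cases hd : PySem.Str.endswith c "-" = true <;> simp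
  | cons l ls ih =>
    have hG : pvGstate (l :: ls) = pvStepB (pvGstate ls) l := rfl
    by_cases hb : (PySem.Str.strip l == "") = true
    · have hstep : pvStepB (pvGstate ls) l = pvGstate ls := by
        simp only [pvStepB]; rw [if_pos hb]
      simp only [pvGoB, hb, if_true, hG, hstep]
      exact ih res c
    · simp only [pvGoB, hb, Bool.false_eq_true, if_false, hG]
      by_cases hd : PySem.Str.endswith c "-" = true
      · rw [if_pos hd, ih, pv_consume_dash l _ c hb hd]
      · rw [if_neg hd, ih, pv_consume_rstrip l _ hb]
        have : pvConsume c (pvStepB (pvGstate ls) l)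
            = c :: pvToOut (pvStepB (pvGstate ls) l) := by
          have hd' : ¬ PySem.Chars.endswith c.toList ['-'] = true := by simpa using hd
          simp [pvConsume, hd']
        rw [this, List.append_assoc]
        rfl

theorem pv_goB_none (ls : List String) (res : List String) :
    pvGoB ls res none = res ++ pvToOut (pvGstate ls) := by
  induction ls generalizing res with
  | nil => simp [pvGoB, pvGstate, pvToOut]
  | cons l ls ih =>
    have hG : pvGstate (l :: ls) = pvStepB (pvGstate ls) l := rfl
    by_cases hb : (PySem.Str.strip l == "") = true
    · have hstep : pvStepB (pvGstate ls) l = pvGstate ls := by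
        simp only [pvStepB]; rw [if_pos hb]
      simp only [pvGoB, hb, if_true, hG, hstep]
      exact ih res
    · simp only [pvGoB, hb, Bool.false_eq_true, if_false, hG]
      rw [pv_goB_some, pv_consume_rstrip l _ hb]

theorem pv_alt_eq (txt : List String) :
    CombineSplittedLines_alt txt = pvToOut (pvGstate txt) := by
  simp only [CombineSplittedLines_alt, pvGstate, pvToOut, List.foldl_reverse]

-- ===== VERDICT (by name: the statement is the Claim_ definition above) =====
theorem CombineSplittedLines_spec : Claim_equal_CombineSplittedLines := by
  intro txt _
  show CombineSplittedLines txt = CombineSplittedLines_alt txt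
  rw [pv_alt_eq]
  unfold CombineSplittedLines
  rw [pv_start_eq txt 0, pv_goB_none, List.nil_append]
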